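-- pv_equiv track=rewrite | github.com/Einfeld686/MarsDiskSimulation | scripts/runsets/windows/preflight_checks.py | _count_parens
-- ===== SOURCE A (Python) =====
-- def _count_parens(line: str) -> tuple[int, int]:
--     opens = 0
--     closes = 0
--     in_quote = False
--     escape = False
--     for ch in line:
--         if escape:
--             escape = False
--             continue
--         if ch == "^":
--             escape = True
--             continue
--         if ch == '"':
--             in_quote = not in_quote
--             continue
--         if in_quote:
--             continue
--         if ch == "(":
--             opens += 1
--         elif ch == ")":
--             closes += 1
--     return opens, closes
-- ===== SOURCE B (Python) =====
-- def _count_parens(line: str) -> tuple[int, int]: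
--     # Pass 1: drop every caret-escaped pair (a '^' and the char after it, if any).
--     kept = []
--     i = 0
--     n = len(line)
--     while i < n:
--         if line[i] == "^":
--             i += 2
--         else:
--             kept.append(line[i])
--             i += 1
--     # Pass 2: count parens outside quotes.
--     opens = 0
--     closes = 0
--     in_quote = False
--     for ch in kept:
--         if ch == '"':
--             in_quote = not in_quote
--         elif not in_quote:
--             if ch == "(":
--                 opens += 1
--             elif ch == ")":
--                 closes += 1
--     return opens, closes
-- ===== Notes on version B (the rewrite author's own statement) =====
-- stated objective: alternative
-- what changed: Replaces the single interleaved escape/quote/paren state machine by two passes: an index scan that deletes each caret-escaped pair into an intermediate list, then a quote-toggling count over that list.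
import Mathlib
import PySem

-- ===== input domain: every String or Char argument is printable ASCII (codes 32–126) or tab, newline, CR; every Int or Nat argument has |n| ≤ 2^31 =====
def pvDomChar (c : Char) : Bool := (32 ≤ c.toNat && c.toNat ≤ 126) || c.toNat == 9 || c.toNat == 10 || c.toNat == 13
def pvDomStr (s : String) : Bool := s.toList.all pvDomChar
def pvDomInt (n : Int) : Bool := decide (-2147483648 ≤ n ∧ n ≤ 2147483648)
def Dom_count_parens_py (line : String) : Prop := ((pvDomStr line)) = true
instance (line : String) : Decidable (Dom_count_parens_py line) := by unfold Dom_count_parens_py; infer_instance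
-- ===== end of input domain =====

-- B replaces A's single interleaved escape/quote/paren state machine by two passes
-- (strip caret-escaped pairs, then count outside quotes); objective: alternative decomposition.

-- ===== PORT A =====
-- A's single loop with state (opens, closes, in_quote, escape), branches in source order.
def countALoop : List Char → Int → Int → Bool → Bool → Int × Int
  | [], opens, closes, _, _ => (opens, closes)
  | ch :: rest, opens, closes, in_quote, escape =>
    if escape then countALoop rest opens closes in_quote false
    else if ch = '^' then countALoop rest opens closes in_quote true
    else if ch = '"' then countALoop rest opens closes (!in_quote) false
    else if in_quote then countALoop rest opens closes in_quote false
    else if ch = '(' then countALoop rest (opens + 1) closes in_quote false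
    else if ch = ')' then countALoop rest opens (closes + 1) in_quote false
    else countALoop rest opens closes in_quote false

def count_parens_py (line : String) : Int × Int :=
  countALoop line.toList 0 0 false false

-- ===== PORT B =====
-- Pass 1: drop every caret-escaped pair ('^' plus the following char, if any).
def stripEsc : List Char → List Char
  | [] => []
  | ch :: rest =>
    if ch = '^' then stripEsc (rest.drop 1)
    else ch :: stripEsc rest
termination_by cs => cs.length
decreasing_by
  · exact Nat.lt_succ_of_le (by simp)
  · simp

-- Pass 2: count parens outside quotes.
def countBLoop : List Char → Int → Int → Bool → Int × Int
  | [], opens, closes, _ => (opens, closes)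
  | ch :: rest, opens, closes, in_quote =>
    if ch = '"' then countBLoop rest opens closes (!in_quote)
    else if !in_quote then
      if ch = '(' then countBLoop rest (opens + 1) closes in_quote
      else if ch = ')' then countBLoop rest opens (closes + 1) in_quote
      else countBLoop rest opens closes in_quote
    else countBLoop rest opens closes in_quote

def count_parens_py_alt (line : String) : Int × Int :=
  countBLoop (stripEsc line.toList) 0 0 false

-- ===== PRECONDITION & SPEC =====
def Spec_count_parens_py (line : String) (out : Int × Int) : Prop := out = count_parens_py_alt line
instance (line : String) (out : Int × Int) : Decidable (Spec_count_parens_py line out) := by unfold Spec_count_parens_py; infer_instance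

-- ===== CLAIM (what is proved, stated in full; the proofs are below) =====
def Claim_equal_count_parens_py : Prop := ∀ (line : String), Dom_count_parens_py line → Spec_count_parens_py line (count_parens_py line)

-- ===== LEMMAS AND PROOFS =====

-- With escape set, A skips one character unconditionally.
theorem countALoop_escape (cs : List Char) (o c : Int) (q : Bool) :
    countALoop cs o c q true = countALoop (cs.drop 1) o c q false := by
  cases cs <;> simp [countALoop]

theorem countALoop_eq_countBLoop (n : Nat) :
    ∀ cs : List Char, cs.length ≤ n → ∀ (o c : Int) (q : Bool),
      countALoop cs o c q false = countBLoop (stripEsc cs) o c q := by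
  induction n with
  | zero =>
    intro cs h o c q
    have : cs = [] := List.eq_nil_of_length_eq_zero (Nat.le_zero.mp h)
    subst this; simp [countALoop, stripEsc, countBLoop]
  | succ n ih =>
    intro cs h o c q
    cases cs with
    | nil => simp [countALoop, stripEsc, countBLoop]
    | cons ch rest =>
      simp only [List.length_cons, Nat.succ_le_succ_iff] at h
      by_cases hc : ch = '^'
      · subst hc
        rw [countALoop, if_neg (by simp), if_pos rfl, countALoop_escape,
          stripEsc, if_pos rfl]
        exact ih _ (by simp; omega) o c q
      · rw [stripEsc, if_neg hc, countBLoop]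
        by_cases hq : ch = '"'
        · subst hq
          rw [countALoop, if_neg (by simp), if_neg (by decide), if_pos rfl, if_pos rfl]
          exact ih _ h o c (!q)
        · rw [if_neg hq]
          cases q with
          | true =>
            rw [countALoop, if_neg (by simp), if_neg hc, if_neg hq, if_pos rfl]
            simpa using ih _ h o c true
          | false =>
            by_cases ho : ch = '('
            · subst ho
              rw [countALoop, if_neg (by simp), if_neg (by decide), if_neg (by decide),
                if_neg (by simp), if_pos rfl]
              simpa using ih _ h (o + 1) c false
            · by_cases hcl : ch = ')'
              · subst hcl
                rw [countALoop, if_neg (by simp), if_neg (by decide), if_neg (by decide),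
                  if_neg (by simp), if_neg (by decide), if_pos rfl]
                simpa using ih _ h o (c + 1) false
              · rw [countALoop, if_neg (by simp), if_neg hc, if_neg hq,
                  if_neg (by simp), if_neg ho, if_neg hcl]
                simpa [ho, hcl] using ih _ h o c false

-- ===== VERDICT (by name: the statement is the Claim_ definition above) =====
theorem count_parens_py_spec : Claim_equal_count_parens_py := by
  intro line _
  unfold Spec_count_parens_py count_parens_py count_parens_py_alt
  exact countALoop_eq_countBLoop line.toList.length line.toList le_rfl 0 0 false
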